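-- pv_equiv track=rewrite | github.com/Vman384/Leetcode | medium/Amazon question 2.py | num_idle_drivers
-- ===== SOURCE A (Python) =====
-- def num_idle_drivers(x, y):
--     xrobots = {}
--     yrobots = {}
--     idleRobots = 0
--     for index, xcoordinate in enumerate(x):
--         try:
--             xrobots[xcoordinate].append(y[index])
--         except KeyError:
--             xrobots[xcoordinate] = [y[index]]
--         try:
--             yrobots[y[index]].append(xcoordinate)
--         except KeyError:
--             yrobots[y[index]] = [xcoordinate]
--     for key in xrobots.keys():
--         xrobots[key].sort()
--     for key in yrobots.keys():
--         yrobots[key].sort()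
--     for index, xcoordinate in enumerate(x):
--         ycoordinate = y[index]
--         if xrobots[xcoordinate][0] < ycoordinate and xrobots[xcoordinate][-1] > ycoordinate and yrobots[ycoordinate][0] < xcoordinate and yrobots[ycoordinate][-1] > xcoordinate:
--             idleRobots += 1
--     return idleRobots
-- ===== SOURCE B (Python) =====
-- def num_idle_drivers(x, y):
--     # One pass tracking min/max per x-column and per y-row; no group lists, no sorting.
--     xmin = {}; xmax = {}; ymin = {}; ymax = {}
--     for xi, yi in zip(x, y):
--         xmin[xi] = min(xmin.get(xi, yi), yi)
--         xmax[xi] = max(xmax.get(xi, yi), yi)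
--         ymin[yi] = min(ymin.get(yi, xi), xi)
--         ymax[yi] = max(ymax.get(yi, xi), xi)
--     return sum(1 for xi, yi in zip(x, y)
--                if xmin[xi] < yi < xmax[xi] and ymin[yi] < xi < ymax[yi])
-- ===== Notes on version B (the rewrite author's own statement) =====
-- stated objective: alternative
-- what changed: Instead of building per-x and per-y lists of coordinates and sorting each group to read its endpoints, B keeps running min/max per x-key and per y-key in one pass and counts points strictly inside both ranges.
import Mathlib
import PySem

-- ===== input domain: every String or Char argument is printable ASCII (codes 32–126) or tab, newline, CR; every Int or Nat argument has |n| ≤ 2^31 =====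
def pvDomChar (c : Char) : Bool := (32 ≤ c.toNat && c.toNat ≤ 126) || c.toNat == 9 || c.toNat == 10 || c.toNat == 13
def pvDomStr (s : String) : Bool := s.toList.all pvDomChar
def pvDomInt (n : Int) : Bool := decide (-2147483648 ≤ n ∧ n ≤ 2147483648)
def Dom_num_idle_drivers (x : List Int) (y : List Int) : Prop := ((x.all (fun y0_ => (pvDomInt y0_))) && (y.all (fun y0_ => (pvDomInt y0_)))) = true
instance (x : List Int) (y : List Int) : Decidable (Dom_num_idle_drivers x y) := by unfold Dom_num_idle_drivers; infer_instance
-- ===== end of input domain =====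

-- B replaces A's per-key sorted group lists by one pass tracking min/max per x-key and per y-key.
-- Equivalence is about the RETURN value; neither program mutates its arguments observably.

-- ===== PORT A =====
-- A's loops 'for index, xcoordinate in enumerate(x): … y[index]' read y exactly at the
-- indices 0..len(x)-1; under Pre_ (len(x) ≤ len(y)) this is exactly the paired traversal x.zip y.
def num_idle_drivers (x : List Int) (y : List Int) : Int :=
  let pairs := x.zip y
  let xrobots := pairs.foldl (fun d p => d.modify p.1 [] (fun l => l ++ [p.2]))
    (PySem.Dict.empty : PySem.Dict Int (List Int))
  let yrobots := pairs.foldl (fun d p => d.modify p.2 [] (fun l => l ++ [p.1]))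
    (PySem.Dict.empty : PySem.Dict Int (List Int))
  let xrobots2 := xrobots.keys.foldl
    (fun d k => d.insert k (PySem.List.sorted (d.getD k []) (fun v => v) false)) xrobots
  let yrobots2 := yrobots.keys.foldl
    (fun d k => d.insert k (PySem.List.sorted (d.getD k []) (fun v => v) false)) yrobots
  -- every group list looked up below is nonempty (it contains the robot itself), so the
  -- Python [0] / [-1] accesses never raise; the defaults here are never read
  pairs.foldl (fun (acc : Int) p =>
    let gx := xrobots2.getD p.1 []
    let gy := yrobots2.getD p.2 []
    if PySem.List.pyGetD gx 0 0 < p.2 ∧ p.2 < PySem.List.pyGetD gx (-1) 0 ∧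
       PySem.List.pyGetD gy 0 0 < p.1 ∧ p.1 < PySem.List.pyGetD gy (-1) 0
    then acc + 1 else acc) 0

-- ===== PORT B =====
def num_idle_drivers_alt (x : List Int) (y : List Int) : Int :=
  let pairs := x.zip y
  let st := pairs.foldl
    (fun (s : PySem.Dict Int Int × PySem.Dict Int Int × PySem.Dict Int Int × PySem.Dict Int Int) p =>
      (s.1.modify p.1 p.2 (fun m => min m p.2),
       s.2.1.modify p.1 p.2 (fun m => max m p.2),
       s.2.2.1.modify p.2 p.1 (fun m => min m p.1),
       s.2.2.2.modify p.2 p.1 (fun m => max m p.1)))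
    (PySem.Dict.empty, PySem.Dict.empty, PySem.Dict.empty, PySem.Dict.empty)
  -- every key looked up below was inserted by the loop, so the Python lookups never raise;
  -- the defaults here are never read
  pairs.foldl (fun (acc : Int) p =>
    if st.1.getD p.1 0 < p.2 ∧ p.2 < st.2.1.getD p.1 0 ∧
       st.2.2.1.getD p.2 0 < p.1 ∧ p.1 < st.2.2.2.getD p.2 0
    then acc + 1 else acc) 0

-- ===== PRECONDITION & SPEC =====
-- Pre_ excludes exactly the inputs with len(y) < len(x), on which A raises IndexError at y[index].
def Pre_num_idle_drivers (x : List Int) (y : List Int) : Prop := x.length ≤ y.length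
instance (x : List Int) (y : List Int) : Decidable (Pre_num_idle_drivers x y) := by
  unfold Pre_num_idle_drivers; infer_instance
def pvWitness_num_idle_drivers : List Int × List Int := ([1, 0, 2, 1, 1], [1, 1, 1, 0, 2])

def Spec_num_idle_drivers (x : List Int) (y : List Int) (out : Int) : Prop := out = num_idle_drivers_alt x y
instance (x : List Int) (y : List Int) (out : Int) : Decidable (Spec_num_idle_drivers x y out) := by unfold Spec_num_idle_drivers; infer_instance

-- ===== CLAIM (what is proved, stated in full; the proofs are below) =====
def Claim_equal_num_idle_drivers : Prop := ∀ (x : List Int) (y : List Int), Dom_num_idle_drivers x y → Pre_num_idle_drivers x y → Spec_num_idle_drivers x y (num_idle_drivers x y)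

-- ===== LEMMAS AND PROOFS =====

-- the list of values grouped under key k when l is traversed with key extractor fst
def pvGroup (l : List (Int × Int)) (k : Int) : List Int :=
  (l.filter (fun p => p.1 == k)).map (fun p => p.2)

-- B's one-pass fold, componentwise
lemma pv_foldl_prod4 (l : List (Int × Int)) (a b c d : PySem.Dict Int Int) :
    l.foldl (fun s p => (s.1.modify p.1 p.2 (fun m => min m p.2),
                         s.2.1.modify p.1 p.2 (fun m => max m p.2),
                         s.2.2.1.modify p.2 p.1 (fun m => min m p.1),
                         s.2.2.2.modify p.2 p.1 (fun m => max m p.1))) (a, b, c, d)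
      = (l.foldl (fun d p => d.modify p.1 p.2 (fun m => min m p.2)) a,
         l.foldl (fun d p => d.modify p.1 p.2 (fun m => max m p.2)) b,
         l.foldl (fun d p => d.modify p.2 p.1 (fun m => min m p.1)) c,
         l.foldl (fun d p => d.modify p.2 p.1 (fun m => max m p.1)) d) := by
  induction l generalizing a b c d with
  | nil => rfl
  | cons p l ih => simp only [List.foldl_cons]; exact ih _ _ _ _

-- B's running min/max dict, characterised on get?
lemma pv_foldl_modify_op (op : Int → Int → Int) (kf vf : (Int × Int) → Int)
    (l : List (Int × Int)) (d : PySem.Dict Int Int) (k : Int) :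
    (l.foldl (fun d p => d.modify (kf p) (vf p) (fun m => op m (vf p))) d).get? k
      = (((l.filter (fun p => kf p == k)).map vf).foldl
          (fun o w => some (op (o.getD w) w)) (d.get? k)) := by
  induction l generalizing d with
  | nil => rfl
  | cons p l ih =>
      simp only [List.foldl_cons, List.filter_cons]
      rw [ih]
      have hget : (d.modify (kf p) (vf p) (fun m => op m (vf p))).get? k
          = if k = kf p then some (op ((d.get? k).getD (vf p)) (vf p)) else d.get? k := by
        by_cases h : k = kf p
        · subst h
          simp [PySem.Dict.modify, PySem.Dict.get?_insert_self, PySem.Dict.getD_eq_get?_getD]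
        · simp [PySem.Dict.modify, PySem.Dict.get?_insert, h]
      rw [hget]
      by_cases h : kf p = k
      · simp [h.symm, List.map_cons, List.foldl_cons]
      · have hb : (kf p == k) = false := by simp [h]
        have h' : ¬ k = kf p := fun hh => h hh.symm
        simp [hb, h']

lemma pv_optfold_eq_foldl (op : Int → Int → Int)
    (vs : List Int) (v : Int) :
    vs.foldl (fun o w => some (op (o.getD w) w)) (some v) = some (vs.foldl op v) := by
  induction vs generalizing v with
  | nil => rfl
  | cons w vs ih => simp [List.foldl_cons, ih]

lemma pv_optfold_none (op : Int → Int → Int) (hid : ∀ w, op w w = w)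
    (v : Int) (vs : List Int) :
    (v :: vs).foldl (fun o w => some (op (o.getD w) w)) none = some (vs.foldl op v) := by
  simp [List.foldl_cons, hid, pv_optfold_eq_foldl op]

lemma pv_foldl_min_mem (vs : List Int) (v : Int) : vs.foldl min v ∈ v :: vs := by
  induction vs generalizing v with
  | nil => simp
  | cons w vs ih =>
      rw [List.foldl_cons]
      rcases List.mem_cons.mp (ih (min v w)) with h | h
      · rw [h]
        rcases le_total v w with hle | hle
        · rw [min_eq_left hle]; exact List.mem_cons_self
        · rw [min_eq_right hle]
          exact List.mem_cons_of_mem _ List.mem_cons_self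
      · exact List.mem_cons_of_mem _ (List.mem_cons_of_mem _ h)

lemma pv_foldl_min_le (vs : List Int) (v : Int) :
    ∀ b ∈ v :: vs, vs.foldl min v ≤ b := by
  induction vs generalizing v with
  | nil => simp
  | cons w vs ih =>
      intro b hb
      rw [List.foldl_cons]
      have hle : vs.foldl min (min v w) ≤ min v w := ih (min v w) _ List.mem_cons_self
      rcases List.mem_cons.mp hb with rfl | hb'
      · exact le_trans hle (min_le_left _ _)
      · rcases List.mem_cons.mp hb' with rfl | hb''
        · exact le_trans hle (min_le_right _ _)
        · exact ih (min v w) b (List.mem_cons_of_mem _ hb'')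

lemma pv_foldl_max_mem (vs : List Int) (v : Int) : vs.foldl max v ∈ v :: vs := by
  induction vs generalizing v with
  | nil => simp
  | cons w vs ih =>
      rw [List.foldl_cons]
      rcases List.mem_cons.mp (ih (max v w)) with h | h
      · rw [h]
        rcases le_total v w with hle | hle
        · rw [max_eq_right hle]
          exact List.mem_cons_of_mem _ List.mem_cons_self
        · rw [max_eq_left hle]; exact List.mem_cons_self
      · exact List.mem_cons_of_mem _ (List.mem_cons_of_mem _ h)

lemma pv_foldl_max_ge (vs : List Int) (v : Int) :
    ∀ b ∈ v :: vs, b ≤ vs.foldl max v := by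
  induction vs generalizing v with
  | nil => simp
  | cons w vs ih =>
      intro b hb
      rw [List.foldl_cons]
      have hle : max v w ≤ vs.foldl max (max v w) := ih (max v w) _ List.mem_cons_self
      rcases List.mem_cons.mp hb with rfl | hb'
      · exact le_trans (le_max_left _ _) hle
      · rcases List.mem_cons.mp hb' with rfl | hb''
        · exact le_trans (le_max_right _ _) hle
        · exact ih (max v w) b (List.mem_cons_of_mem _ hb'')

-- last element of a ≤-sorted nonempty list bounds all elements
lemma pv_pairwise_le_getLast (l : List Int) (h : l.Pairwise (· ≤ ·)) (hne : l ≠ []) :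
    ∀ a ∈ l, a ≤ l.getLast hne := by
  induction l with
  | nil => simp at hne
  | cons v t ih =>
      intro a ha
      cases t with
      | nil => simp at ha; simp [ha, List.getLast]
      | cons w s =>
          rcases List.mem_cons.mp ha with rfl | ha'
          · have h1 : a ≤ w := (List.pairwise_cons.mp h).1 w (List.mem_cons_self)
            have := ih (List.pairwise_cons.mp h).2 (by simp) w (List.mem_cons_self)
            calc a ≤ w := h1
              _ ≤ _ := by simpa [List.getLast] using this
          · have := ih (List.pairwise_cons.mp h).2 (by simp) a ha'
            simpa [List.getLast] using this

-- head of the sorted group is the running min; last is the running max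
lemma pv_sorted_head_last (v : Int) (vs : List Int) :
    ∃ t, PySem.List.sorted (v :: vs) (fun z => z) false = (vs.foldl min v) :: t
       ∧ (PySem.List.sorted (v :: vs) (fun z => z) false).getLast (by
            simp [PySem.List.sorted_eq_nil_iff]) = vs.foldl max v := by
  set s := PySem.List.sorted (v :: vs) (fun z => z) false with hs
  have hperm : s.Perm (v :: vs) := PySem.List.sorted_perm _ _ _
  have hpw : s.Pairwise (fun a b => a ≤ b) := PySem.List.sorted_pairwise (v :: vs) (fun z => z)
  have hne : s ≠ [] := by simp [hs, PySem.List.sorted_eq_nil_iff]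
  obtain ⟨m, t, hmt⟩ := List.exists_cons_of_ne_nil hne
  refine ⟨t, ?_, ?_⟩
  · have h1 : m ≤ vs.foldl min v :=
      PySem.List.key_head_sorted_le (v :: vs) (fun z => z) (hs ▸ hmt) _ (pv_foldl_min_mem vs v)
    have h2 : vs.foldl min v ≤ m :=
      pv_foldl_min_le vs v m ((hperm.mem_iff).mp (by rw [hmt]; exact List.mem_cons_self))
    rw [← hs, hmt, le_antisymm h2 h1]
  · have hlast_mem : s.getLast hne ∈ s := List.getLast_mem hne
    have h1 : s.getLast hne ≤ vs.foldl max v :=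
      pv_foldl_max_ge vs v _ ((hperm.mem_iff).mp hlast_mem)
    have h2 : vs.foldl max v ≤ s.getLast hne :=
      pv_pairwise_le_getLast s hpw hne _ ((hperm.mem_iff).mpr (pv_foldl_max_mem vs v))
    exact le_antisymm h1 h2

-- A's grouping dict after the sorting pass, on keys of the dict
lemma pv_sort_pass_getD (ks : List Int) (hks : ks.Nodup) (d : PySem.Dict Int (List Int)) (k : Int) :
    (ks.foldl (fun d k => d.insert k (PySem.List.sorted (d.getD k []) (fun v => v) false)) d).getD k []
      = if k ∈ ks then PySem.List.sorted (d.getD k []) (fun v => v) false else d.getD k [] := by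
  induction ks generalizing d with
  | nil => simp
  | cons k' ks ih =>
      have hk' : k' ∉ ks := (List.nodup_cons.mp hks).1
      have hnd : ks.Nodup := (List.nodup_cons.mp hks).2
      simp only [List.foldl_cons]
      rw [ih hnd]
      by_cases h : k = k'
      · subst h
        simp [hk']
      · by_cases hm : k ∈ ks
        · simp [hm, h, PySem.Dict.getD_insert]
        · simp [hm, h, PySem.Dict.getD_insert]

-- get?/getD on A's grouping dict
lemma pv_group_getD (l : List (Int × Int)) (k : Int) :
    (l.foldl (fun d p => d.modify p.1 [] (fun g => g ++ [p.2])) PySem.Dict.empty).getD k []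
      = pvGroup l k := by
  simpa [pvGroup] using
    PySem.Dict.getD_foldl_modify_append l (PySem.Dict.empty) k

-- membership of a key in A's grouping dict
lemma pv_mem_keys_group (l : List (Int × Int)) (k : Int) (hne : pvGroup l k ≠ []) :
    k ∈ (l.foldl (fun d p => d.modify p.1 [] (fun g => g ++ [p.2])) PySem.Dict.empty).keys := by
  by_contra h
  have hnone := (PySem.Dict.get?_eq_none_iff_not_mem_keys _ _).mpr h
  have := PySem.Dict.getD_of_get?_eq_none _ ([] : List Int) hnone
  rw [pv_group_getD] at this
  exact hne this

lemma pv_pyGetD_zero (m d : Int) (t : List Int) : PySem.List.pyGetD (m :: t) 0 d = m := by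
  simp [pysem]

lemma pv_pyGetD_neg_one (l : List Int) (hne : l ≠ []) (d : Int) :
    PySem.List.pyGetD l (-1) d = l.getLast hne := by
  have hlen : 1 ≤ l.length := List.length_pos_of_ne_nil hne
  simp only [PySem.List.pyGetD, PySem.List.pyGet?, PySem.List.pyIdx?]
  norm_num [hlen]
  simp [List.getElem?_eq_getElem (by omega : l.length - 1 < l.length), List.getLast_eq_getElem]

-- A-side: the sorted-groups dict reads back the sorted group
lemma pv_side (L : List (Int × Int)) (k v : Int) (vs : List Int)
    (hg : pvGroup L k = v :: vs) :
    ((L.foldl (fun d p => d.modify p.1 [] (fun g => g ++ [p.2]))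
        (PySem.Dict.empty : PySem.Dict Int (List Int))).keys.foldl
      (fun d k => d.insert k (PySem.List.sorted (d.getD k []) (fun z => z) false))
      (L.foldl (fun d p => d.modify p.1 [] (fun g => g ++ [p.2]))
        (PySem.Dict.empty : PySem.Dict Int (List Int)))).getD k []
      = PySem.List.sorted (v :: vs) (fun z => z) false := by
  set G := L.foldl (fun d p => d.modify p.1 [] (fun g => g ++ [p.2]))
    (PySem.Dict.empty : PySem.Dict Int (List Int)) with hGdef
  have hnd : G.keys.Nodup :=
    PySem.Dict.nodup_keys_foldl_modify_key L (fun p => p.1) [] (fun _ p => fun g => g ++ [p.2])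
      PySem.Dict.empty (by simp)
  have hmem : k ∈ G.keys := pv_mem_keys_group L k (by simp [hg])
  rw [pv_sort_pass_getD G.keys hnd G k, if_pos hmem]
  have hGk : G.getD k [] = v :: vs := by rw [hGdef, pv_group_getD]; exact hg
  rw [hGk]

lemma pv_sorted_reads (v : Int) (vs : List Int) :
    PySem.List.pyGetD (PySem.List.sorted (v :: vs) (fun z => z) false) 0 0 = vs.foldl min v
  ∧ PySem.List.pyGetD (PySem.List.sorted (v :: vs) (fun z => z) false) (-1) 0 = vs.foldl max v := by
  obtain ⟨t, hhead, hlast⟩ := pv_sorted_head_last v vs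
  have hne : PySem.List.sorted (v :: vs) (fun z => z) false ≠ [] := by
    simp [PySem.List.sorted_eq_nil_iff]
  constructor
  · rw [hhead, pv_pyGetD_zero]
  · rw [pv_pyGetD_neg_one _ hne 0]; exact hlast

-- B-side: the running-min / running-max dict read at a key with nonempty group
lemma pv_minmax_getD (op : Int → Int → Int) (hid : ∀ w, op w w = w)
    (kf vf : (Int × Int) → Int) (L : List (Int × Int)) (k v : Int) (vs : List Int)
    (hg : (L.filter (fun p => kf p == k)).map vf = v :: vs) :
    (L.foldl (fun d p => d.modify (kf p) (vf p) (fun m => op m (vf p)))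
        (PySem.Dict.empty : PySem.Dict Int Int)).getD k 0 = vs.foldl op v := by
  have h := pv_foldl_modify_op op kf vf L PySem.Dict.empty k
  rw [PySem.Dict.get?_empty, hg, pv_optfold_none op hid v vs] at h
  exact PySem.Dict.getD_of_get?_eq_some _ 0 h

-- the group of a pair present in the list is nonempty
lemma pv_self_mem_group (L : List (Int × Int)) (p : Int × Int) (hp : p ∈ L) :
    p.2 ∈ pvGroup L p.1 := by
  simp only [pvGroup, List.mem_map, List.mem_filter]
  exact ⟨p, ⟨hp, by simp⟩, rfl⟩

lemma pv_swap_group (L : List (Int × Int)) (k : Int) :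
    pvGroup (L.map Prod.swap) k = (L.filter (fun p => p.2 == k)).map (fun p => p.1) := by
  simp [pvGroup, List.filter_map, List.map_map, Function.comp_def, Prod.swap]

theorem num_idle_drivers_spec : Claim_equal_num_idle_drivers := by
  intro x y _ _
  unfold Spec_num_idle_drivers num_idle_drivers num_idle_drivers_alt
  simp only []
  simp only [pv_foldl_prod4]
  apply PySem.List.foldl_congr_mem
  intro acc p hp
  -- nonempty x-group and y-group of p
  rcases hgx : pvGroup (x.zip y) p.1 with _ | ⟨v, vs⟩
  · exact absurd (pv_self_mem_group _ p hp) (by simp [hgx])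
  rcases hgy : pvGroup ((x.zip y).map Prod.swap) p.2 with _ | ⟨w, ws⟩
  · have hm := pv_self_mem_group ((x.zip y).map Prod.swap) p.swap
      (List.mem_map_of_mem hp)
    simp only [Prod.fst_swap, Prod.snd_swap] at hm
    rw [hgy] at hm
    exact absurd hm (by simp)
  -- A-side reads
  have hx := pv_side (x.zip y) p.1 v vs hgx
  have hyshape :
      ((x.zip y).map Prod.swap).foldl (fun d q => d.modify q.1 [] (fun g => g ++ [q.2]))
          (PySem.Dict.empty : PySem.Dict Int (List Int))
        = (x.zip y).foldl (fun d q => d.modify q.2 [] (fun g => g ++ [q.1]))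
          (PySem.Dict.empty : PySem.Dict Int (List Int)) := by
    simp only [List.foldl_map, Prod.fst_swap, Prod.snd_swap]
  have hy := pv_side ((x.zip y).map Prod.swap) p.2 w ws hgy
  rw [hyshape] at hy
  obtain ⟨hx0, hx1⟩ := pv_sorted_reads v vs
  obtain ⟨hy0, hy1⟩ := pv_sorted_reads w ws
  -- B-side reads
  have hgy' : ((x.zip y).filter (fun q => q.2 == p.2)).map (fun q => q.1) = w :: ws := by
    rw [← pv_swap_group]; exact hgy
  have hminx := pv_minmax_getD min (fun z => min_self z) (fun q => q.1) (fun q => q.2)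
    (x.zip y) p.1 v vs (by simpa [pvGroup] using hgx)
  have hmaxx := pv_minmax_getD max (fun z => max_self z) (fun q => q.1) (fun q => q.2)
    (x.zip y) p.1 v vs (by simpa [pvGroup] using hgx)
  have hminy := pv_minmax_getD min (fun z => min_self z) (fun q => q.2) (fun q => q.1)
    (x.zip y) p.2 w ws hgy'
  have hmaxy := pv_minmax_getD max (fun z => max_self z) (fun q => q.2) (fun q => q.1)
    (x.zip y) p.2 w ws hgy'
  rw [hx, hy, hminx, hmaxx, hminy, hmaxy, hx0, hx1, hy0, hy1]
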